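-- pv_equiv track=rewrite | github.com/gaspard-quenard/pddl4j-rantanplan | test_performance.py | extract_plan_from_output
-- ===== SOURCE A (Python) =====
-- from typing import List, Tuple
--
-- def extract_plan_from_output(output_command: str) -> List[str]:
--     """ Extract plan from the output of command line which launch a planner. If no plan is found, return None
--
--     Args:
--         output_command (str): stdout of the command line which launch a planner
--
--     Returns:
--         List[str]: The plan as a list of strings where each value of the list as index i correspond to the action of the plan at index i. Return None if no plan is found
--     """
--
--     all_lines_output = output_command.splitlines()
--
--     try:
--         idx_line_state_plan = all_lines_output.index(
--             "found plan as follows:") + 2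
--         i = 0
--         plan = []
--         while (idx_line_state_plan + i < len(all_lines_output) and all_lines_output[idx_line_state_plan + i] != ''):
--             plan.append(all_lines_output[idx_line_state_plan + i])
--             i += 1
--
--         return plan
--
--     except ValueError:
--         return None
-- ===== SOURCE B (Python) =====
-- def extract_plan_from_output(output_command: str):
--     lines = output_command.splitlines()
--     try:
--         start = lines.index("found plan as follows:") + 2
--     except ValueError:
--         return None
--     try:
--         end = lines.index('', start)
--     except ValueError:
--         end = len(lines)
--     return lines[start:end]
-- ===== Notes on version B (the rewrite author's own statement) =====
-- stated objective: simpler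
-- what changed: Replaces the element-by-element while/append loop with locating the two boundaries (marker index + 2, next blank line or end) and returning a single slice.
import Mathlib
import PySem

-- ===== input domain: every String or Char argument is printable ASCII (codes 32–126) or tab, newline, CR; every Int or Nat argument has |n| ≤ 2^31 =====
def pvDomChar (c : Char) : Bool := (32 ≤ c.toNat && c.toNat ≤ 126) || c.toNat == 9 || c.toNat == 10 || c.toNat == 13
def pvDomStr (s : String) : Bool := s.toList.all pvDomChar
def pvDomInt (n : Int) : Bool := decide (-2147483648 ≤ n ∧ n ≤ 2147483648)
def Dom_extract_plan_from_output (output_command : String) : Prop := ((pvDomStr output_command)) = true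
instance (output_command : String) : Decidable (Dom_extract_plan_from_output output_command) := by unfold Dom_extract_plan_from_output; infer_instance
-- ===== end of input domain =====

-- B replaces A's element-by-element while/append collection with a two-boundary
-- locate-then-slice decomposition (simpler); proved equal on all inputs.


-- ===== PORT A =====
-- A's while loop: collect lines[pos], pos increasing, stop at end or at '' (pos = idx+i).
def pvLoopA (lines : List String) (pos : Nat) (plan : List String) : List String :=
  if _h : pos < lines.length then
    if lines.getD pos "" = "" then plan
    else pvLoopA lines (pos + 1) (plan ++ [lines.getD pos ""])
  else plan
termination_by lines.length - pos

def extract_plan_from_output (output_command : String) : Option (List String) :=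
  let all_lines_output := PySem.Str.splitlines output_command
  match PySem.List.index? all_lines_output "found plan as follows:" with
  | none => none
  | some k => some (pvLoopA all_lines_output (k + 2) [])

-- ===== PORT B =====
-- lines.index('', start) is ported as index? on lines.drop start (absolute = start + relative).
def extract_plan_from_output_alt (output_command : String) : Option (List String) :=
  let lines := PySem.Str.splitlines output_command
  match PySem.List.index? lines "found plan as follows:" with
  | none => none
  | some k =>
    let start := k + 2
    let stop :=
      match PySem.List.index? (lines.drop start) "" with
      | some j => start + j
      | none => lines.length
    some (PySem.List.slice lines (some (start : Int)) (some (stop : Int)))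

-- ===== PRECONDITION & SPEC =====
def Spec_extract_plan_from_output (output_command : String) (out : Option (List String)) : Prop := out = extract_plan_from_output_alt output_command
instance (output_command : String) (out : Option (List String)) : Decidable (Spec_extract_plan_from_output output_command out) := by unfold Spec_extract_plan_from_output; infer_instance

-- ===== CLAIM (what is proved, stated in full; the proofs are below) =====
def Claim_equal_extract_plan_from_output : Prop := ∀ (output_command : String), Dom_extract_plan_from_output output_command → Spec_extract_plan_from_output output_command (extract_plan_from_output output_command)

-- ===== LEMMAS AND PROOFS =====

theorem pvLoopA_eq (t : List String) : ∀ (lines : List String) (pos : Nat) (plan : List String),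
    lines.drop pos = t →
    pvLoopA lines pos plan = plan ++ t.take ((PySem.List.index? t "").getD t.length) := by
  induction t with
  | nil =>
    intro lines pos plan h
    have hle : lines.length ≤ pos := by
      have := congrArg List.length h
      simp [List.length_drop] at this
      omega
    unfold pvLoopA
    simp [Nat.not_lt.mpr hle]
  | cons x t' ih =>
    intro lines pos plan h
    have hlt : pos < lines.length := by
      have := congrArg List.length h
      simp [List.length_drop] at this
      omega
    have hget : lines[pos]? = some x := by
      have : (lines.drop pos)[0]? = some x := by rw [h]; rfl
      simpa using this
    have hgetD : lines.getD pos "" = x := by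
      simp [List.getD, hget]
    have hdrop' : lines.drop (pos + 1) = t' := by
      have : (lines.drop pos).drop 1 = t' := by rw [h]; rfl
      simpa [List.drop_drop, Nat.add_comm] using this
    unfold pvLoopA
    rw [dif_pos hlt, hgetD]
    by_cases hx : x = ""
    · subst hx
      rw [if_pos rfl]
      rw [PySem.List.index?_cons_self]
      simp
    · rw [if_neg hx]
      rw [ih lines (pos + 1) (plan ++ [x]) hdrop']
      rw [PySem.List.index?_cons_of_ne t' hx]
      cases hidx : PySem.List.index? t' "" with
      | none => simp [List.append_assoc, List.take_succ_cons]
      | some j => simp [List.append_assoc, List.take_succ_cons]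

-- ===== VERDICT (by name: the statement is the Claim_ definition above) =====
theorem extract_plan_from_output_spec : Claim_equal_extract_plan_from_output := by
  intro output_command _
  unfold Spec_extract_plan_from_output extract_plan_from_output extract_plan_from_output_alt
  cases hk : PySem.List.index? (PySem.Str.splitlines output_command) "found plan as follows:" with
  | none => simp only [hk]
  | some k =>
    simp only [hk]
    rw [pvLoopA_eq (List.drop (k + 2) (PySem.Str.splitlines output_command)) _ (k + 2) [] rfl]
    cases hidx : PySem.List.index? (List.drop (k + 2) (PySem.Str.splitlines output_command)) "" with
    | none =>
      simp only []
      rw [PySem.List.slice_natCast]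
      simp [List.length_drop]
    | some j =>
      simp only []
      rw [show ((↑(k + 2) : Int) + (↑j : Int)) = ((↑(k + 2 + j) : Nat) : Int) by push_cast; ring]
      rw [PySem.List.slice_natCast]
      simp
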